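-- pv_equiv track=rewrite | github.com/jsbloo/python_scripts | zero_split.py | zero_split
-- ===== SOURCE A (Python) =====
-- def zero_split(s):
--     i = 0
--     j = 0
--     s_list = []
--     for c in s:
--         if c == '0':
--             if i+1 < len(s):
--                 if s[i+1] != '0':
--                     s_list.append(s[j:i+1])
--                     j = i+1
--         if i+1 == len(s):
--             s_list.append(s[j:i+1])
--         i+=1
--     return s_list
-- ===== SOURCE B (Python) =====
-- def zero_split(s):
--     if not s:
--         return []
--     cuts = [i + 1 for i in range(len(s) - 1) if s[i] == '0' and s[i + 1] != '0']
--     out = []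
--     prev = 0
--     for c in cuts:
--         out.append(s[prev:c])
--         prev = c
--     out.append(s[prev:])
--     return out
-- ===== Notes on version B (the rewrite author's own statement) =====
-- stated objective: alternative
-- what changed: B separates boundary-finding from slice-building: a first pass collects cut indices (i+1 wherever s[i]=='0' and s[i+1]!='0'), a second pass slices between consecutive cuts, instead of A's single fused scan with two index pointers and an in-loop end-of-string append.
import Mathlib
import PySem

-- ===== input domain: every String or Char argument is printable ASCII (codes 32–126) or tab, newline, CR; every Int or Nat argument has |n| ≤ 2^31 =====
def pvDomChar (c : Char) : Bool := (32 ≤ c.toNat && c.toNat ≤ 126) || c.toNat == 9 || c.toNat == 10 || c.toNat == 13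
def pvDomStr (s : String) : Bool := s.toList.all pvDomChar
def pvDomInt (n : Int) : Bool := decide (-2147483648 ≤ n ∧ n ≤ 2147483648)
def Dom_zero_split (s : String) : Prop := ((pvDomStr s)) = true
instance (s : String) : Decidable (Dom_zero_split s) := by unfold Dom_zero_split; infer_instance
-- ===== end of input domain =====

-- B separates boundary-finding (one pass collecting cut indices) from slice-building
-- (a second pass over the cuts), replacing A's fused two-pointer scan; objective: alternative decomposition.

-- ===== PORT A =====
-- A's loop body: state (i, j, s_list); segments kept as List Char, wrapped into String at the end.
def pvStepA (l : List Char) (st : Nat × Nat × List (List Char)) (c : Char) :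
    Nat × Nat × List (List Char) :=
  let i := st.1
  let j := st.2.1
  let acc := st.2.2
  let ja :=
    if c = '0' then
      if i + 1 < l.length then
        if PySem.List.pyGet? l ((i : Int) + 1) ≠ some '0' then
          (i + 1, acc ++ [PySem.List.slice l (some (j : Int)) (some ((i : Int) + 1))])
        else (j, acc)
      else (j, acc)
    else (j, acc)
  let acc2 :=
    if i + 1 = l.length then
      ja.2 ++ [PySem.List.slice l (some ((ja.1 : Int))) (some ((i : Int) + 1))]
    else ja.2
  (i + 1, ja.1, acc2)

def zero_split (s : String) : List String :=
  let l := s.toList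
  ((l.foldl (pvStepA l) (0, 0, [])).2.2).map String.ofList

-- ===== PORT B =====
-- B's second pass: state (prev, out).
def pvStepB (l : List Char) (po : Nat × List (List Char)) (c : Nat) :
    Nat × List (List Char) :=
  (c, po.2 ++ [PySem.List.slice l (some (po.1 : Int)) (some (c : Int))])

def zero_split_alt (s : String) : List String :=
  let l := s.toList
  if l = [] then []
  else
    let cuts := (List.range (l.length - 1)).filterMap (fun i =>
      if l[i]? = some '0' ∧ l[i + 1]? ≠ some '0' then some (i + 1) else none)
    let po := cuts.foldl (pvStepB l) (0, [])
    (po.2 ++ [PySem.List.slice l (some (po.1 : Int)) none]).map String.ofList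

-- ===== PRECONDITION & SPEC =====
def Spec_zero_split (s : String) (out : List String) : Prop := out = zero_split_alt s
instance (s : String) (out : List String) : Decidable (Spec_zero_split s out) := by unfold Spec_zero_split; infer_instance

-- ===== CLAIM (what is proved, stated in full; the proofs are below) =====
def Claim_equal_zero_split : Prop := ∀ (s : String), Dom_zero_split s → Spec_zero_split s (zero_split s)

-- ===== LEMMAS AND PROOFS =====

-- segment s[j:k] on the char list
def pvSeg (l : List Char) (j k : Nat) : List Char := (l.drop j).take (k - j)

-- cut indices contributed by loop indices i ≥ n
def pvCutsFrom (l : List Char) (n : Nat) : List Nat :=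
  (List.range' n (l.length - 1 - n)).filterMap (fun i =>
    if l[i]? = some '0' ∧ l[i + 1]? ≠ some '0' then some (i + 1) else none)

-- the tail of the output produced from position n with pending start j
def pvTail (l : List Char) (j : Nat) : List Nat → List (List Char)
  | [] => [l.drop j]
  | c :: cs => pvSeg l j c :: pvTail l c cs

lemma pvSeg_eq_slice (l : List Char) (j k : Nat) :
    PySem.List.slice l (some (j : Int)) (some (k : Int)) = pvSeg l j k := by
  simpa [pvSeg] using PySem.List.slice_natCast l j k

lemma pvCutsFrom_last (l : List Char) (n : Nat) (h : n + 1 = l.length) :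
    pvCutsFrom l n = [] := by
  simp [pvCutsFrom, show l.length - 1 - n = 0 by omega]

lemma pvCutsFrom_cons (l : List Char) (n : Nat) (h : n + 1 < l.length) :
    pvCutsFrom l n =
      (if l[n]? = some '0' ∧ l[n + 1]? ≠ some '0' then [n + 1] else []) ++ pvCutsFrom l (n + 1) := by
  have hr : l.length - 1 - n = (l.length - 1 - (n + 1)) + 1 := by omega
  rw [pvCutsFrom, hr, List.range'_succ, List.filterMap_cons]
  split_ifs with hc <;> simp [pvCutsFrom]

lemma pvLoopA (l : List Char) :
    ∀ fuel n j acc, n + fuel = l.length → 0 < fuel →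
      ((l.drop n).foldl (pvStepA l) (n, j, acc)).2.2 = acc ++ pvTail l j (pvCutsFrom l n) := by
  intro fuel
  induction fuel with
  | zero => intro n j acc _ h0; omega
  | succ f ih =>
    intro n j acc hlen _
    have hn : n < l.length := by omega
    have hdrop : l.drop n = l[n] :: l.drop (n + 1) := List.drop_eq_getElem_cons hn
    have hget : PySem.List.pyGet? l ((n : Int) + 1) = l[n + 1]? := by
      have : ((n : Int) + 1) = ((n + 1 : Nat) : Int) := by push_cast; ring
      rw [this, PySem.List.pyGet?_natCast]
    have hgn : l[n]? = some l[n] := List.getElem?_eq_getElem hn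
    rw [hdrop, List.foldl_cons]
    by_cases hlast : n + 1 = l.length
    · -- last iteration
      have hc : ¬ (n + 1 < l.length) := by omega
      have hdrop2 : l.drop (n + 1) = [] := by
        simp [List.drop_eq_nil_iff]; omega
      have hslice : PySem.List.slice l (some (j : Int)) (some ((n : Int) + 1)) = l.drop j := by
        have h1 : ((n : Int) + 1) = ((n + 1 : Nat) : Int) := by push_cast; ring
        rw [h1, pvSeg_eq_slice, pvSeg, hlast]
        exact List.take_of_length_le (by simp)
      have hstep : pvStepA l (n, j, acc) l[n] = (n + 1, j, acc ++ [l.drop j]) := by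
        simp [pvStepA, hlast, hslice]
      rw [hstep, hdrop2, List.foldl_nil, pvCutsFrom_last l n hlast]
      simp [pvTail]
    · -- n + 1 < l.length
      have hlt : n + 1 < l.length := by omega
      have hseg : PySem.List.slice l (some (j : Int)) (some ((n : Int) + 1)) = pvSeg l j (n + 1) := by
        have h1 : ((n : Int) + 1) = ((n + 1 : Nat) : Int) := by push_cast; ring
        rw [h1, pvSeg_eq_slice]
      rw [pvCutsFrom_cons l n hlt]
      by_cases hcond : l[n]? = some '0' ∧ l[n + 1]? ≠ some '0'
      · have hc0 : l[n] = '0' := Option.some_inj.mp (hgn.symm.trans hcond.1)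
        have hgn1 : l[n + 1]? = some l[n + 1] := List.getElem?_eq_getElem hlt
        have hne : ¬ l[n + 1] = '0' := fun h => hcond.2 (by rw [hgn1, h])
        have hstep : pvStepA l (n, j, acc) l[n] = (n + 1, n + 1, acc ++ [pvSeg l j (n + 1)]) := by
          simp [pvStepA, hc0, hlt, hget, hne, hlast, hseg]
        rw [hstep, ih (n + 1) (n + 1) (acc ++ [pvSeg l j (n + 1)]) (by omega) (by omega)]
        simp [hcond, pvTail]
      · have hstep : pvStepA l (n, j, acc) l[n] = (n + 1, j, acc) := by
          by_cases h0 : l[n] = '0'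
          · have h1 : l[n + 1]? = some '0' := by
              by_contra h1
              exact hcond ⟨by rw [hgn, h0], h1⟩
            simp [pvStepA, h0, hget, h1, hlast]
          · simp [pvStepA, h0, hlast]
        rw [hstep, ih (n + 1) j acc (by omega) (by omega)]
        simp [hcond]

lemma pvLoopB (l : List Char) :
    ∀ cs prev out,
      ((cs.foldl (pvStepB l) (prev, out)).2 ++
        [l.drop (cs.foldl (pvStepB l) (prev, out)).1]) = out ++ pvTail l prev cs := by
  intro cs
  induction cs with
  | nil => intro prev out; simp [pvTail]
  | cons c cs ih =>
    intro prev out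
    have hs : pvStepB l (prev, out) c = (c, out ++ [pvSeg l prev c]) := by
      simp [pvStepB, pvSeg_eq_slice]
    rw [List.foldl_cons, hs, ih c (out ++ [pvSeg l prev c])]
    simp [pvTail]

lemma pvCuts_eq (l : List Char) :
    (List.range (l.length - 1)).filterMap (fun i =>
      if l[i]? = some '0' ∧ l[i + 1]? ≠ some '0' then some (i + 1) else none) = pvCutsFrom l 0 := by
  rw [pvCutsFrom, List.range_eq_range']
  norm_num

-- ===== VERDICT (by name: the statement is the Claim_ definition above) =====
theorem zero_split_spec : Claim_equal_zero_split := by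
  intro s _
  unfold Spec_zero_split zero_split zero_split_alt
  by_cases hnil : s.toList = []
  · simp [hnil]
  · have hlen : 0 < s.toList.length := List.length_pos_iff.mpr hnil
    have hA := pvLoopA s.toList s.toList.length 0 0 [] (by omega) hlen
    rw [List.drop_zero] at hA
    have hB := pvLoopB s.toList (pvCutsFrom s.toList 0) 0 []
    simp only [if_neg hnil, pvCuts_eq]
    rw [hA]
    rw [PySem.List.slice_from_natCast]
    rw [hB]
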